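-- pv_equiv track=rewrite | github.com/ahmedsaleh17/PythonBootCamp | ProblemSolving/07.py | convertToBase13v2
-- ===== SOURCE A (Python) =====
-- def convertToBase13v2(num):
--     if num == 0:
--         return "0"
--
--     base13_digits = "0123456789ABC"
--     digits_arr = []
--     positive = abs(num)
--
--     while positive > 0:
--         # Append to list
--         digits_arr.append(base13_digits[positive % 13])
--         positive = positive // 13
--
--     reversed_digits = digits_arr[::-1]
--     # Join list into a string
--     result = ''.join(reversed_digits)
--
--     if num < 0:
--         return "-" + result
--     else:
--         return result
-- ===== SOURCE B (Python) =====
-- def convertToBase13v2(num):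
--     if num == 0:
--         return "0"
--
--     base13_digits = "0123456789ABC"
--
--     def f(n):
--         return (f(n // 13) if n >= 13 else '') + base13_digits[n % 13]
--
--     s = f(abs(num))
--     return '-' + s if num < 0 else s
-- ===== Notes on version B (the rewrite author's own statement) =====
-- stated objective: simpler
-- what changed: Replaces the while-loop that appends least-significant digits into a list, then reverses and joins it, with a recursive helper that emits the most-significant digits first via the call stack, so no list, reversal or join is needed.
import Mathlib
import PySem

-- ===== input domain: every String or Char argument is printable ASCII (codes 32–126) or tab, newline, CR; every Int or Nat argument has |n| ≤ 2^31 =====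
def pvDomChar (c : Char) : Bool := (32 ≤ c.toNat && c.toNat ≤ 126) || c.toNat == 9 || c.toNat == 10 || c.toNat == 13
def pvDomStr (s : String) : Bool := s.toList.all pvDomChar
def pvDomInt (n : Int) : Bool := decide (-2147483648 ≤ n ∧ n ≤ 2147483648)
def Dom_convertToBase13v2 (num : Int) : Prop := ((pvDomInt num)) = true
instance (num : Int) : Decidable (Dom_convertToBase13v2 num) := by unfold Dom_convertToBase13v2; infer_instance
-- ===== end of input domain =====

-- B changes the decomposition: a recursive helper emits most-significant digits first, so A's
-- digit list, reversal and join disappear; same cost, simpler shape.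

-- ===== PORT A =====
-- base13_digits = "0123456789ABC"; indexing with i = positive % 13 is always in range,
-- so getD is exact here (Python's base13_digits[i] never raises for 0 ≤ i < 13).
def pvBase13Digits : List Char := "0123456789ABC".toList

-- the while loop over `positive`; Python's abs(num) is nonnegative, so `positive` is carried as a
-- Nat and Python's // and % on it coincide exactly with Nat division/modulo.
def pvLoopA : Nat → List Char → List Char
  | 0, acc => acc
  | p + 1, acc => pvLoopA ((p + 1) / 13) (acc ++ [pvBase13Digits.getD ((p + 1) % 13) ' '])
decreasing_by exact Nat.div_lt_self (Nat.succ_pos p) (by omega)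

def convertToBase13v2 (num : Int) : String :=
  if num == 0 then "0"
  else
    let digitsArr := pvLoopA num.natAbs []
    -- digits_arr[::-1] : full negative-step slice = reverse (PySem.List.slice?_none_none_neg_one)
    let reversedDigits := digitsArr.reverse
    let result := String.ofList reversedDigits
    if num < 0 then "-" ++ result else result

-- ===== PORT B =====
-- the recursive helper f; n = abs(num) is nonnegative, carried as Nat (exact for // and %).
def pvRecB : Nat → List Char
  | n => (if h : n ≥ 13 then pvRecB (n / 13) else []) ++ [pvBase13Digits.getD (n % 13) ' ']
decreasing_by exact Nat.div_lt_self (by omega) (by omega)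

def convertToBase13v2_alt (num : Int) : String :=
  if num == 0 then "0"
  else
    let s := String.ofList (pvRecB num.natAbs)
    if num < 0 then "-" ++ s else s

-- ===== PRECONDITION & SPEC =====
def Spec_convertToBase13v2 (num : Int) (out : String) : Prop := out = convertToBase13v2_alt num
instance (num : Int) (out : String) : Decidable (Spec_convertToBase13v2 num out) := by unfold Spec_convertToBase13v2; infer_instance

-- ===== CLAIM (what is proved, stated in full; the proofs are below) =====
def Claim_equal_convertToBase13v2 : Prop := ∀ (num : Int), Dom_convertToBase13v2 num → Spec_convertToBase13v2 num (convertToBase13v2 num)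

-- ===== LEMMAS AND PROOFS =====

-- A's loop accumulates onto the right of acc
theorem pvLoopA_acc (p : Nat) (acc : List Char) : pvLoopA p acc = acc ++ pvLoopA p [] := by
  induction p using Nat.strong_induction_on generalizing acc with
  | _ p ih =>
    match p with
    | 0 => simp [pvLoopA]
    | q + 1 =>
      rw [pvLoopA, pvLoopA,
        ih ((q + 1) / 13) (Nat.div_lt_self (Nat.succ_pos q) (by omega)) (acc ++ [pvBase13Digits.getD ((q + 1) % 13) ' ']),
        ih ((q + 1) / 13) (Nat.div_lt_self (Nat.succ_pos q) (by omega)) ([] ++ [pvBase13Digits.getD ((q + 1) % 13) ' '])]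
      simp

-- the reversed loop output is exactly B's recursion, for positive n
theorem pvLoopA_reverse_eq (n : Nat) (hn : 0 < n) :
    (pvLoopA n []).reverse = pvRecB n := by
  induction n using Nat.strong_induction_on with
  | _ n ih =>
    match n with
    | q + 1 =>
      rw [pvLoopA, pvLoopA_acc, pvRecB]
      by_cases h : q + 1 ≥ 13
      · have hd : 0 < (q + 1) / 13 := Nat.div_pos h (by omega)
        rw [dif_pos h, ← ih ((q + 1) / 13) (Nat.div_lt_self (Nat.succ_pos q) (by omega)) hd]
        simp
      · have hd : (q + 1) / 13 = 0 := Nat.div_eq_of_lt (by omega)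
        rw [dif_neg h, hd]
        simp [pvLoopA]

-- ===== VERDICT (by name: the statement is the Claim_ definition above) =====
theorem convertToBase13v2_spec : Claim_equal_convertToBase13v2 := by
  intro num _
  unfold Spec_convertToBase13v2 convertToBase13v2 convertToBase13v2_alt
  by_cases h0 : num = 0
  · simp [h0]
  · have hpos : 0 < num.natAbs := Int.natAbs_pos.mpr h0
    simp only [beq_iff_eq, if_neg h0, pvLoopA_reverse_eq num.natAbs hpos]
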